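-- pv_equiv track=rewrite | github.com/rahulmercer/dsa-python-75 | recursion/rope-cutting.py | maxPieces
-- ===== SOURCE A (Python) =====
-- def maxPieces(n, a, b, c, memo=None):
--     if memo is None:
--         memo = {}
--
--     if n == 0:
--         return 0
--
--     if n < 0:
--         return -1
--
--     if n in memo:
--         return memo[n]
--
--     res_a = maxPieces(n - a, a, b, c, memo)
--     res_b = maxPieces(n - b, a, b, c, memo)
--     res_c = maxPieces(n - c, a, b, c, memo)
--
--     max_pieces = max(res_a, res_b, res_c)
--     if max_pieces == -1:
--         memo[n] = -1
--     else:
--         memo[n] = max_pieces + 1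
--
--     return memo[n]
-- ===== SOURCE B (Python) =====
-- def maxPieces(n, a, b, c, memo=None):
--     if n == 0:
--         return 0
--     if n < 0:
--         return -1
--     dp = [0]
--     for i in range(1, n + 1):
--         best = -1
--         for d in (a, b, c):
--             if 0 < d <= i and dp[i - d] != -1:
--                 best = max(best, dp[i - d] + 1)
--         dp.append(best)
--     return dp[n]
-- ===== Notes on version B (the rewrite author's own statement) =====
-- stated objective: alternative
-- what changed: Replaced A's top-down memoized recursion (dict cache threaded through three recursive calls) with an iterative bottom-up DP that fills a table dp[0..n] in one forward loop.
-- outside the precondition, e.g. on maxPieces(5, 2, 2, 2, {5: 99}): A returns 99, B returns -1; on maxPieces(5, 0, 2, 2, None): A raises RecursionError, B returns -1; on maxPieces(1810, 2, 2, 2, None): A returns 905, B returns 905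
import Mathlib
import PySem

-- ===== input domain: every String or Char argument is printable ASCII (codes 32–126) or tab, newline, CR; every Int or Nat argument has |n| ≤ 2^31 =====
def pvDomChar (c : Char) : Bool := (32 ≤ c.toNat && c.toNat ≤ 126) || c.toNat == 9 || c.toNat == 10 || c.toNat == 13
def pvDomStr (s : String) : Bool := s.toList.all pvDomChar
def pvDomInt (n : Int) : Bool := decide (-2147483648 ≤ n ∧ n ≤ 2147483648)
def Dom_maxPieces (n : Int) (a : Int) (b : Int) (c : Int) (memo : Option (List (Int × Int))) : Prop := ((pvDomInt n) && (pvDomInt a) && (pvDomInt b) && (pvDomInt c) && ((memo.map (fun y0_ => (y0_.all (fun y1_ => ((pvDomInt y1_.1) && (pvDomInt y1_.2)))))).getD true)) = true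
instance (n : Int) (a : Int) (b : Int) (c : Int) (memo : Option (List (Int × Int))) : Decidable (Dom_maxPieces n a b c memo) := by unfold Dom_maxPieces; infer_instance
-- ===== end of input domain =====

-- B replaces A's top-down memoized recursion by an iterative bottom-up DP table (objective: alternative decomposition).
-- A mutates a caller-supplied memo dict in place; the equivalence proved here is about the RETURN value only.

-- ===== PORT A =====
-- A's recursion is totalized with a fuel counter; within Pre_ (positive cuts) the call depth is
-- at most n+1, so fuel n.toNat+1 makes the port compute exactly what the Python computes there.
def goA : Nat → Int → Int → Int → Int → PySem.Dict Int Int → Int × PySem.Dict Int Int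
  | 0, _, _, _, _, memo => (-1, memo)   -- fuel exhausted: unreachable under Pre_
  | fuel + 1, n, a, b, c, memo =>
    if n = 0 then (0, memo)
    else if n < 0 then (-1, memo)
    else
      match memo.get? n with
      | some v => (v, memo)
      | none =>
        let ra := goA fuel (n - a) a b c memo
        let rb := goA fuel (n - b) a b c ra.2
        let rc := goA fuel (n - c) a b c rb.2
        let mp := max ra.1 (max rb.1 rc.1)
        let res := if mp = -1 then -1 else mp + 1
        (res, rc.2.insert n res)

def maxPieces (n : Int) (a : Int) (b : Int) (c : Int) (memo : Option (List (Int × Int))) : Int :=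
  (goA (n.toNat + 1) n a b c
    (match memo with
     | none => PySem.Dict.empty          -- if memo is None: memo = {}
     | some l => PySem.Dict.ofList l)).1

-- ===== PORT B =====
-- one 'if 0 < d <= i and dp[i-d] != -1: best = max(best, dp[i-d]+1)' step of B's inner loop;
-- the index i-d lies in [0, i-1] = range of dp when the guard holds, so pyGet?/getD is exact there
def bTry (dp : List Int) (i d best : Int) : Int :=
  if 0 < d ∧ d ≤ i then
    let v := (PySem.List.pyGet? dp (i - d)).getD (-1)
    if v ≠ -1 then max best (v + 1) else best
  else best

def bStep (a b c : Int) (dp : List Int) (i : Int) : List Int :=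
  dp ++ [bTry dp i c (bTry dp i b (bTry dp i a (-1)))]

def maxPieces_alt (n : Int) (a : Int) (b : Int) (c : Int) (memo : Option (List (Int × Int))) : Int :=
  if n = 0 then 0
  else if n < 0 then -1
  else
    let dp := (PySem.List.pyRange 1 (n + 1) 1).foldl (bStep a b c) [0]
    (PySem.List.pyGet? dp n).getD (-1)   -- dp[n]; in range since dp has length n+1

-- ===== PRECONDITION & SPEC =====
-- Pre_ excludes (i) non-positive cut lengths, where A recurses without progress (RecursionError);
-- (ii) n > 900*min(a,b,c), where A's recursion depth (~n/min(a,b,c)) can exceed Python's recursion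
-- limit — this tracks A's actual crash region, though the cutoff is slightly conservative; and
-- (iii) calls with a pre-seeded non-empty memo, whose entries override the computation arbitrarily
-- (an artefact of exposing the cache).
def Pre_maxPieces (n : Int) (a : Int) (b : Int) (c : Int) (memo : Option (List (Int × Int))) : Prop :=
  n ≤ 0 ∨ (1 ≤ a ∧ 1 ≤ b ∧ 1 ≤ c ∧ n ≤ 900 * min a (min b c) ∧ (memo = none ∨ memo = some []))
instance (n : Int) (a : Int) (b : Int) (c : Int) (memo : Option (List (Int × Int))) : Decidable (Pre_maxPieces n a b c memo) := by unfold Pre_maxPieces; infer_instance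

def pvWitness_maxPieces : Int × Int × Int × Int × (Option (List (Int × Int))) := (10, 2, 3, 5, none)

def Spec_maxPieces (n : Int) (a : Int) (b : Int) (c : Int) (memo : Option (List (Int × Int))) (out : Int) : Prop := out = maxPieces_alt n a b c memo
instance (n : Int) (a : Int) (b : Int) (c : Int) (memo : Option (List (Int × Int))) (out : Int) : Decidable (Spec_maxPieces n a b c memo out) := by unfold Spec_maxPieces; infer_instance

-- ===== CLAIM (what is proved, stated in full; the proofs are below) =====
def Claim_equal_maxPieces : Prop := ∀ (n : Int) (a : Int) (b : Int) (c : Int) (memo : Option (List (Int × Int))), Dom_maxPieces n a b c memo → Pre_maxPieces n a b c memo → Spec_maxPieces n a b c memo (maxPieces n a b c memo)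

-- ===== LEMMAS AND PROOFS =====

-- combine the three candidate sub-results the way both programs do
def comb3 (va vb vc : Int) : Int :=
  if max va (max vb vc) = -1 then -1 else max va (max vb vc) + 1

-- the mathematical value both programs compute: max number of pieces of sizes a,b,c summing to k, or -1
def fSpec (a b c : Int) (k : Nat) : Int :=
  if hk : k = 0 then 0
  else comb3
    (if h : 0 < a ∧ a ≤ (k : Int) then fSpec a b c (k - a.toNat) else -1)
    (if h : 0 < b ∧ b ≤ (k : Int) then fSpec a b c (k - b.toNat) else -1)
    (if h : 0 < c ∧ c ≤ (k : Int) then fSpec a b c (k - c.toNat) else -1)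
termination_by k
decreasing_by all_goals omega

def fInt (a b c n : Int) : Int := if n < 0 then -1 else fSpec a b c n.toNat

theorem comb3_ge (va vb vc : Int) (h : -1 ≤ va) : -1 ≤ comb3 va vb vc := by
  unfold comb3
  have := le_max_left va (max vb vc)
  split_ifs <;> omega

theorem fSpec_ge (a b c : Int) : ∀ k : Nat, -1 ≤ fSpec a b c k := by
  intro k
  induction k using Nat.strong_induction_on with
  | _ k ih =>
    rw [fSpec]
    by_cases hk : k = 0
    · rw [dif_pos hk]; omega
    · rw [dif_neg hk]
      apply comb3_ge
      split_ifs with h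
      · exact ih _ (by omega)
      · omega

theorem fInt_sub (a b c d n : Int) (hd : 1 ≤ d) (hn : 0 < n) :
    fInt a b c (n - d) = if 0 < d ∧ d ≤ (n.toNat : Int) then fSpec a b c (n.toNat - d.toNat) else -1 := by
  unfold fInt
  by_cases hc' : d ≤ n
  · rw [if_neg (by omega), if_pos (by omega)]
    have : (n - d).toNat = n.toNat - d.toNat := by omega
    rw [this]
  · rw [if_pos (by omega), if_neg (by omega)]

theorem fSpec_pos (a b c n : Int) (ha : 1 ≤ a) (hb : 1 ≤ b) (hc : 1 ≤ c) (hn : 0 < n) :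
    fSpec a b c n.toNat = comb3 (fInt a b c (n - a)) (fInt a b c (n - b)) (fInt a b c (n - c)) := by
  rw [fSpec, dif_neg (by omega : ¬ n.toNat = 0)]
  rw [fInt_sub a b c a n ha hn, fInt_sub a b c b n hb hn, fInt_sub a b c c n hc hn]
  simp only [dite_eq_ite]

theorem fInt_pos (a b c n : Int) (hn : 0 < n) : fInt a b c n = fSpec a b c n.toNat := by
  rw [fInt, if_neg (by omega)]

def InvA (a b c : Int) (m : PySem.Dict Int Int) : Prop :=
  ∀ k v, m.get? k = some v → v = fInt a b c k

theorem goA_correct (a b c : Int) (ha : 1 ≤ a) (hb : 1 ≤ b) (hc : 1 ≤ c) :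
    ∀ (fuel : Nat) (n : Int) (m : PySem.Dict Int Int), n.toNat < fuel → InvA a b c m →
      (goA fuel n a b c m).1 = fInt a b c n ∧ InvA a b c (goA fuel n a b c m).2 := by
  intro fuel
  induction fuel with
  | zero => intro n m hf _; omega
  | succ fuel ih =>
    intro n m hf hInv
    by_cases h0 : n = 0
    · subst h0
      constructor
      · simp [goA, fInt, fSpec]
      · simpa [goA] using hInv
    by_cases hneg : n < 0
    · constructor
      · simp [goA, h0, hneg, fInt]
      · simpa [goA, h0, hneg] using hInv
    have hn : 0 < n := by omega
    cases hm : m.get? n with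
    | some v =>
      constructor
      · simp only [goA, if_neg h0, if_neg hneg, hm]
        exact hInv n v hm
      · simpa only [goA, if_neg h0, if_neg hneg, hm] using hInv
    | none =>
      have hfa : (n - a).toNat < fuel := by omega
      have hfb : (n - b).toNat < fuel := by omega
      have hfc : (n - c).toNat < fuel := by omega
      obtain ⟨ea, ia⟩ := ih (n - a) m hfa hInv
      obtain ⟨eb, ib⟩ := ih (n - b) _ hfb ia
      obtain ⟨ec, ic⟩ := ih (n - c) _ hfc ib
      have hres : (if max (goA fuel (n - a) a b c m).1
            (max (goA fuel (n - b) a b c (goA fuel (n - a) a b c m).2).1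
                 (goA fuel (n - c) a b c (goA fuel (n - b) a b c (goA fuel (n - a) a b c m).2).2).1) = -1
          then (-1 : Int)
          else max (goA fuel (n - a) a b c m).1
            (max (goA fuel (n - b) a b c (goA fuel (n - a) a b c m).2).1
                 (goA fuel (n - c) a b c (goA fuel (n - b) a b c (goA fuel (n - a) a b c m).2).2).1) + 1)
          = fInt a b c n := by
        rw [ea, eb, ec, fInt_pos a b c n hn, fSpec_pos a b c n ha hb hc hn, comb3]
      constructor
      · simp only [goA, if_neg h0, if_neg hneg, hm]
        exact hres
      · simp only [goA, if_neg h0, if_neg hneg, hm]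
        intro k v hget
        rw [PySem.Dict.get?_insert] at hget
        by_cases hk : k = n
        · rw [if_pos hk] at hget
          cases hget
          rw [hk]
          exact hres
        · rw [if_neg hk] at hget
          exact ic k v hget

-- one inner-loop update of B, abstractly
def gB (best w : Int) : Int := if w = -1 then best else max best (w + 1)

theorem chain_comb (wa wb wc : Int) (ha : -1 ≤ wa) (hb : -1 ≤ wb) (hc : -1 ≤ wc) :
    gB (gB (gB (-1) wa) wb) wc = comb3 wa wb wc := by
  unfold gB comb3
  simp only [max_def]
  split_ifs <;> omega

theorem bTry_eval (a b c : Int) (m : Nat) (d best : Int) :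
    bTry ((List.range m).map (fSpec a b c)) (m : Int) d best
      = gB best (if h : 0 < d ∧ d ≤ (m : Int) then fSpec a b c (m - d.toNat) else -1) := by
  unfold bTry gB
  by_cases hg : 0 < d ∧ d ≤ (m : Int)
  · rw [if_pos hg, dif_pos hg]
    have h1 : (0 : Int) ≤ (m : Int) - d := by omega
    have h2 : (m : Int) - d < ((List.range m).map (fSpec a b c)).length := by
      simp; omega
    rw [PySem.List.pyGet?_eq_some_getElem _ h1 h2]
    have hidx : ((m : Int) - d).toNat = m - d.toNat := by omega
    simp only [Option.getD_some, List.getElem_map, List.getElem_range, hidx]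
    by_cases hv : fSpec a b c (m - d.toNat) = -1
    · simp [hv]
    · simp [hv]
  · rw [if_neg hg, dif_neg hg]
    simp

theorem loopB (a b c : Int) : ∀ k : Nat,
    (PySem.List.pyRange 1 ((k : Int) + 1) 1).foldl (bStep a b c) [0]
      = (List.range (k + 1)).map (fSpec a b c) := by
  intro k
  induction k with
  | zero =>
    rw [PySem.List.pyRange_one_eq_nil (by omega)]
    simp [List.range_succ, fSpec]
  | succ k ih =>
    have hsplit : PySem.List.pyRange 1 ((↑(k+1) : Int) + 1) 1
        = PySem.List.pyRange 1 ((k : Int) + 1) 1 ++ [((k : Int) + 1)] := by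
      push_cast
      exact PySem.List.pyRange_one_succ_right (by omega)
    rw [hsplit, List.foldl_append, ih]
    simp only [List.foldl_cons, List.foldl_nil]
    rw [List.range_succ (n := k + 1), List.map_append]
    unfold bStep
    congr 1
    have hcast : ((k : Int) + 1) = ((k + 1 : Nat) : Int) := by push_cast; ring
    rw [hcast]
    rw [bTry_eval a b c (k+1) a, bTry_eval a b c (k+1) b, bTry_eval a b c (k+1) c]
    have hge : ∀ d : Int, -1 ≤ (if h : 0 < d ∧ d ≤ ((k+1 : Nat) : Int) then fSpec a b c ((k+1) - d.toNat) else -1) := by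
      intro d; split_ifs
      · exact fSpec_ge a b c _
      · omega
    rw [chain_comb _ _ _ (hge a) (hge b) (hge c)]
    simp only [List.map_cons, List.map_nil]
    congr 1
    conv_rhs => rw [fSpec]
    rw [dif_neg (by omega : ¬ (k + 1) = 0)]

theorem altB (a b c n : Int) (memo : Option (List (Int × Int))) (hn : 0 < n) :
    maxPieces_alt n a b c memo = fSpec a b c n.toNat := by
  obtain ⟨k, rfl⟩ : ∃ k : Nat, n = (k : Int) := ⟨n.toNat, by omega⟩
  unfold maxPieces_alt
  rw [if_neg (by omega), if_neg (by omega), loopB a b c k]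
  simp

-- ===== VERDICT (by name: the statement is the Claim_ definition above) =====
theorem maxPieces_spec : Claim_equal_maxPieces := by
  intro n a b c memo _dom hpre
  unfold Spec_maxPieces
  by_cases hn0 : n ≤ 0
  · by_cases h0 : n = 0
    · subst h0; simp [maxPieces, maxPieces_alt, goA]
    · have hneg : n < 0 := by omega
      simp [maxPieces, maxPieces_alt, goA, if_neg h0, hneg]
  · rcases hpre with h | ⟨ha, hb, hc, _h900, hmemo⟩
    · omega
    have hn : 0 < n := by omega
    rcases hmemo with rfl | rfl
    · have hInv : InvA a b c PySem.Dict.empty := by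
        intro k v hget
        simp [PySem.Dict.get?_empty] at hget
      have hA := (goA_correct a b c ha hb hc (n.toNat + 1) n _ (by omega) hInv).1
      show (goA (n.toNat + 1) n a b c PySem.Dict.empty).1 = maxPieces_alt n a b c none
      rw [hA, altB a b c n none hn, fInt_pos a b c n hn]
    · have hInv : InvA a b c (PySem.Dict.ofList ([] : List (Int × Int))) := by
        intro k v hget
        simp [PySem.Dict.ofList, PySem.Dict.update, PySem.Dict.get?_empty] at hget
      have hA := (goA_correct a b c ha hb hc (n.toNat + 1) n _ (by omega) hInv).1
      show (goA (n.toNat + 1) n a b c (PySem.Dict.ofList ([] : List (Int × Int)))).1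
          = maxPieces_alt n a b c (some [])
      rw [hA, altB a b c n (some []) hn, fInt_pos a b c n hn]
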